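-- pv_equiv track=rewrite | github.com/kenshi777/infa_2022-2023 | contests_1/fiveth/b.py | cycle_shift
-- ===== SOURCE A (Python) =====
-- def cycle_shift(arr, N):
--     if N == 1:
--         return arr
--     else:
--         arr[0], arr[N-1] = arr[N-1], arr[0]
--         for i in range(N-2):
--             arr[i], arr[i+1] = arr[i+1], arr[i]
--         return arr
-- ===== SOURCE B (Python) =====
-- def cycle_shift(arr, N):
--     if N == 1:
--         return arr
--     temp = arr[0]
--     for i in range(N - 1):
--         arr[i] = arr[i + 1]
--     arr[N - 1] = temp
--     return arr
-- ===== Notes on version B (the rewrite author's own statement) =====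
-- stated objective: simpler
-- what changed: Replaces A's end-swap followed by a bubbling adjacent-swap pass with a save-and-shift left rotation: save arr[0], copy each of the first N-1 elements one slot left, write the saved value at position N-1; Pre_ restricts to the natural domain N = 1 or 1 <= N <= len(arr), since for N <= 0 A's value is an accident of Python's negative-index wraparound.
-- outside the precondition, e.g. on cycle_shift([1, 2, 3], 0): A returns [3, 2, 1], B returns [1, 2, 1]; on cycle_shift([1, 2, 3], -1): A returns [2, 1, 3], B returns [1, 1, 3]; on cycle_shift([1, 2, 3], -2): A returns [1, 2, 3], B returns [1, 2, 3]
import Mathlib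
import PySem

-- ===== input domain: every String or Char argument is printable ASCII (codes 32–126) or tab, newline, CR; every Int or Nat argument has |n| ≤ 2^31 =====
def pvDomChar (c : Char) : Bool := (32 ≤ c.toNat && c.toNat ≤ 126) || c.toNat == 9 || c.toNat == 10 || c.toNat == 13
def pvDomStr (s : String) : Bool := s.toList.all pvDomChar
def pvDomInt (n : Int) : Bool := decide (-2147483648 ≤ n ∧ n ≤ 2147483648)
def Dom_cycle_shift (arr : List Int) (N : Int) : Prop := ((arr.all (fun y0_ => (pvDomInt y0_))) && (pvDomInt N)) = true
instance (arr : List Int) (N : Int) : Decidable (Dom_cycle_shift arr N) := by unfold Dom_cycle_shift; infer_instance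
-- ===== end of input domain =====

-- B replaces A's end-swap + adjacent-swap bubbling with a save-and-shift left rotation (same O(N) cost, simpler mechanism); both Pythons mutate arr in place, the proof is about the return value.


-- ===== PORT A =====
def cycle_shift (arr : List Int) (N : Int) : List Int :=
  if N = 1 then arr
  else
    -- arr[0], arr[N-1] = arr[N-1], arr[0]
    let t0 := PySem.List.pyGetD arr (N - 1) 0
    let t1 := PySem.List.pyGetD arr 0 0
    let s := PySem.List.pySetD (PySem.List.pySetD arr 0 t0) (N - 1) t1
    -- for i in range(N-2): arr[i], arr[i+1] = arr[i+1], arr[i]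
    (PySem.List.pyRange 0 (N - 2) 1).foldl
      (fun l i =>
        let u0 := PySem.List.pyGetD l (i + 1) 0
        let u1 := PySem.List.pyGetD l i 0
        PySem.List.pySetD (PySem.List.pySetD l i u0) (i + 1) u1) s

-- ===== PORT B =====
def cycle_shift_alt (arr : List Int) (N : Int) : List Int :=
  if N = 1 then arr
  else
    -- temp = arr[0]
    let temp := PySem.List.pyGetD arr 0 0
    -- for i in range(N-1): arr[i] = arr[i+1]
    let s := (PySem.List.pyRange 0 (N - 1) 1).foldl
      (fun l i => PySem.List.pySetD l i (PySem.List.pyGetD l (i + 1) 0)) arr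
    -- arr[N-1] = temp
    PySem.List.pySetD s (N - 1) temp

-- ===== PRECONDITION & SPEC =====
-- Pre_ restricts to the natural domain (N = 1, or 1 ≤ N ≤ len(arr)): for N > len(arr) A raises
-- IndexError, and for N ≤ 0 A's returned value is an accident of Python's negative-index wraparound
-- (e.g. A swaps the two endpoints when N = 0), not part of the function's purpose.
def Pre_cycle_shift (arr : List Int) (N : Int) : Prop :=
  N = 1 ∨ (1 ≤ N ∧ N ≤ arr.length)
instance (arr : List Int) (N : Int) : Decidable (Pre_cycle_shift arr N) := by
  unfold Pre_cycle_shift; infer_instance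

def pvWitness_cycle_shift : List Int × Int := ([1, 2, 3], 2)

def Spec_cycle_shift (arr : List Int) (N : Int) (out : List Int) : Prop := out = cycle_shift_alt arr N
instance (arr : List Int) (N : Int) (out : List Int) : Decidable (Spec_cycle_shift arr N out) := by unfold Spec_cycle_shift; infer_instance

-- ===== CLAIM (what is proved, stated in full; the proofs are below) =====
def Claim_equal_cycle_shift : Prop := ∀ (arr : List Int) (N : Int), Dom_cycle_shift arr N → Pre_cycle_shift arr N → Spec_cycle_shift arr N (cycle_shift arr N)

-- ===== LEMMAS AND PROOFS =====

-- B's shift loop over pyRange, reduced to a Nat-indexed foldl over List.range.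
theorem pyfold_shift (k : Nat) (l : List Int) :
    (PySem.List.pyRange 0 (k : Int) 1).foldl
      (fun l i => PySem.List.pySetD l i (PySem.List.pyGetD l (i + 1) 0)) l
    = (List.range k).foldl (fun l j => l.set j (l.getD (j + 1) 0)) l := by
  rw [PySem.List.pyRange_one, List.foldl_map]
  simp only [Int.sub_zero, Int.toNat_natCast, zero_add]
  congr 1
  funext l j
  rw [show ((j : Int) + 1) = ((j + 1 : Nat) : Int) by push_cast; ring]
  simp only [PySem.List.pyGetD_natCast, PySem.List.pySetD_natCast]

-- A's swap loop over pyRange, reduced to a Nat-indexed foldl over List.range.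
theorem pyfold_swap (k : Nat) (l : List Int) :
    (PySem.List.pyRange 0 (k : Int) 1).foldl
      (fun l i =>
        let u0 := PySem.List.pyGetD l (i + 1) 0
        let u1 := PySem.List.pyGetD l i 0
        PySem.List.pySetD (PySem.List.pySetD l i u0) (i + 1) u1) l
    = (List.range k).foldl
        (fun l j => (l.set j (l.getD (j + 1) 0)).set (j + 1) (l.getD j 0)) l := by
  rw [PySem.List.pyRange_one, List.foldl_map]
  simp only [Int.sub_zero, Int.toNat_natCast, zero_add]
  congr 1
  funext l j
  rw [show ((j : Int) + 1) = ((j + 1 : Nat) : Int) by push_cast; ring]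
  simp only [PySem.List.pyGetD_natCast, PySem.List.pySetD_natCast]

-- closed form of B's shift loop: the first k slots are shifted one left.
theorem shiftFoldNat (k : Nat) (l : List Int) (hk : k < l.length) :
    (List.range k).foldl (fun l j => l.set j (l.getD (j + 1) 0)) l
    = l.tail.take k ++ l.drop k := by
  induction k with
  | zero => simp
  | succ k ih =>
    rw [List.range_succ, List.foldl_append, List.foldl_cons, List.foldl_nil,
        ih (by omega)]
    have hT : (l.tail.take k).length = k := by simp; omega
    have hD : l.drop k = l[k] :: l.drop (k + 1) := List.drop_eq_getElem_cons (by omega)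
    have hD2 : l.drop (k + 1) = l[k + 1] :: l.drop (k + 2) := List.drop_eq_getElem_cons (by omega)
    have hg : (l.tail.take k ++ l.drop k).getD (k + 1) 0 = l[k + 1] := by
      rw [List.getD_eq_getElem _ _ (by simp; omega),
          List.getElem_append_right (by omega)]
      simp only [hT, show k + 1 - k = 1 from by omega, hD, hD2,
        List.getElem_cons_succ, List.getElem_cons_zero]
    rw [hg, List.set_append, if_neg (by omega), hT]
    have hset : (l.drop k).set (k - k) l[k + 1] = l[k + 1] :: l.drop (k + 1) := by
      rw [Nat.sub_self, hD, List.set_cons_zero]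
    rw [hset, List.take_add_one]
    have htk : l.tail[k]? = some l[k + 1] := by
      rw [List.getElem?_tail, List.getElem?_eq_getElem (by omega)]
    simp [htk]

-- closed form of A's swap loop: first k slots shifted left, slot k holds the old head.
theorem swapFoldNat (k : Nat) (l : List Int) (hk : k < l.length) :
    (List.range k).foldl
      (fun l j => (l.set j (l.getD (j + 1) 0)).set (j + 1) (l.getD j 0)) l
    = l.tail.take k ++ [l.getD 0 0] ++ l.drop (k + 1) := by
  induction k with
  | zero =>
    rw [List.getD_eq_getElem _ _ (by omega)]
    have h0 := List.drop_eq_getElem_cons (show 0 < l.length by omega)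
    simp only [List.drop_zero] at h0
    simpa using h0
  | succ k ih =>
    rw [List.range_succ, List.foldl_append, List.foldl_cons, List.foldl_nil,
        ih (by omega)]
    have hT : (l.tail.take k).length = k := by simp; omega
    have hD : l.drop (k + 1) = l[k + 1] :: l.drop (k + 2) :=
      List.drop_eq_getElem_cons (by omega)
    have hR : l.tail.take k ++ [l.getD 0 0] ++ l.drop (k + 1)
        = l.tail.take k ++ (l.getD 0 0 :: l.drop (k + 1)) := by simp
    have hg1 : (l.tail.take k ++ [l.getD 0 0] ++ l.drop (k + 1)).getD (k + 1) 0 = l[k + 1] := by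
      rw [hR, List.getD_eq_getElem _ _ (by simp; omega),
          List.getElem_append_right (by omega)]
      simp only [hT, show k + 1 - k = 1 from by omega, hD,
        List.getElem_cons_succ, List.getElem_cons_zero]
    have hg2 : (l.tail.take k ++ [l.getD 0 0] ++ l.drop (k + 1)).getD k 0 = l.getD 0 0 := by
      rw [hR, List.getD_eq_getElem _ _ (by simp; omega),
          List.getElem_append_right (by omega)]
      simp only [hT, Nat.sub_self, List.getElem_cons_zero]
    rw [hg1, hg2, hR, List.set_append,
        if_neg (show ¬ (k < (l.tail.take k).length) by omega),
        hT, Nat.sub_self, List.set_cons_zero, List.set_append,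
        if_neg (show ¬ (k + 1 < (l.tail.take k).length) by omega),
        hT, show k + 1 - k = 1 from by omega, List.set_cons_succ, hD,
        List.set_cons_zero, List.take_add_one]
    have htk : l.tail[k]? = some l[k + 1] := by
      rw [List.getElem?_tail, List.getElem?_eq_getElem (by omega)]
    simp [htk]

theorem cycle_shift_spec : Claim_equal_cycle_shift := by
  intro arr N _ hpre
  unfold Spec_cycle_shift
  by_cases h1 : N = 1
  · simp [cycle_shift, cycle_shift_alt, h1]
  · rcases hpre with h | ⟨hge, hle⟩
    · exact absurd h h1
    have h2 : 2 ≤ N := by omega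
    obtain ⟨n, rfl⟩ : ∃ n : Nat, N = (n : Int) := ⟨N.toNat, by omega⟩
    have hn2 : 2 ≤ n := by exact_mod_cast h2
    have hnl : n ≤ arr.length := by exact_mod_cast hle
    obtain ⟨x, xs, rfl⟩ : ∃ x xs, arr = x :: xs := by
      cases arr with
      | nil => simp at hnl; omega
      | cons x xs => exact ⟨x, xs, rfl⟩
    simp only [List.length_cons] at hnl
    have hxl : n - 2 < xs.length := by omega
    have e1 : (n : Int) - 1 = ((n - 1 : Nat) : Int) := by omega
    have e2 : (n : Int) - 2 = ((n - 2 : Nat) : Int) := by omega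
    rw [cycle_shift, cycle_shift_alt, if_neg h1, if_neg h1]
    simp only [e1, e2, pyfold_shift (n - 1), pyfold_swap (n - 2),
      PySem.List.pyGetD_natCast, PySem.List.pySetD_natCast,
      PySem.List.pyGetD_zero_cons]
    rw [PySem.List.pySetD_of_nonneg _ _ (le_refl (0 : Int)), Int.toNat_zero]
    -- reduce A's initial end-swap on the cons list
    rw [show ((x :: xs).getD (n - 1) 0) = xs[n - 2] from by
          rw [show n - 1 = (n - 2) + 1 from by omega, List.getD_cons_succ]
          exact List.getD_eq_getElem _ _ hxl,
        List.set_cons_zero,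
        show n - 1 = (n - 2) + 1 from by omega, List.set_cons_succ]
    rw [swapFoldNat (n - 2) _ (by simp; omega),
        shiftFoldNat ((n - 2) + 1) (x :: xs) (by simp; omega)]
    rw [List.tail_cons, List.getD_cons_zero, List.drop_succ_cons, List.tail_cons]
    -- A side: take over set, drop over set
    rw [List.take_set, List.set_eq_of_length_le (by simp),
        List.drop_set, if_neg (by omega), Nat.sub_self,
        List.drop_eq_getElem_cons (i := n - 2) hxl, List.set_cons_zero]
    -- B side: drop on the cons list, then the final set lands at the head of the drop
    have hTlen : (xs.take ((n - 2) + 1)).length = (n - 2) + 1 := by simp; omega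
    rw [List.drop_succ_cons, List.drop_eq_getElem_cons (i := n - 2) hxl,
        List.set_append, if_neg (by rw [hTlen]; omega), hTlen, Nat.sub_self,
        List.set_cons_zero]
    -- both sides: xs.take (n-2) ++ [xs[n-2]] ++ x :: xs.drop (n-1)  vs  xs.take (n-1) ++ x :: ...
    rw [List.take_add_one, List.getElem?_eq_getElem hxl]
    simp
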